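-- pv_equiv track=rewrite | github.com/vikramjit-sidhu/algorithms | hacker_rank/greedy/priyanka_toys.py | find_min_units_to_buy_toys
-- ===== SOURCE A (Python) =====
-- def sort_list(list_tosort):
--     """ Returns a sorted list """
--     return sorted(list_tosort)
--
-- def calculate_toys_obtained_for_free(weight_list, index, num_toys):
--     """
--     The toy in list at 'index' position has been bought,
--     find which toys are gotten for free (in range [w, w+4])
--     """
--     weight_range_high = weight_list[index] + 4
--     while (index < num_toys):
--         if (weight_list[index] > weight_range_high):
--             break
--         index += 1
--     return index
--
-- def find_min_units_to_buy_toys(num_toys, toy_weight_list):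
--     """
--     Given that each toy costs 1 unit, on buying a toy of w weight,
--     all toys in range [w, w+4] come free. All toys must be bought
--     Iterating through list, and finding which toys to spend units on
--     """
--     # sorting weight list
--     sorted_wt_list = sort_list(toy_weight_list)
--     index = 0
--     units = 0   # the number of units used
--     while (index < num_toys):
--         units += 1
--         index = calculate_toys_obtained_for_free(sorted_wt_list, index, num_toys)
--     return units
-- ===== SOURCE B (Python) =====
-- def find_min_units_to_buy_toys(num_toys, toy_weight_list):
--     """Sort, then jump from purchase to purchase with a hand-written
--     binary search for the first weight beyond the covered range."""
--     sorted_wt_list = sorted(toy_weight_list)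
--     units = 0
--     index = 0
--     while index < num_toys:
--         units += 1
--         target = sorted_wt_list[index] + 4
--         lo, hi = index + 1, num_toys
--         while lo < hi:
--             mid = (lo + hi) // 2
--             if sorted_wt_list[mid] > target:
--                 hi = mid
--             else:
--                 lo = mid + 1
--         index = lo
--     return units
-- ===== Notes on version B (the rewrite author's own statement) =====
-- stated objective: alternative
-- what changed: Replaced A's linear skip-helper that rescans element by element with purchase-to-purchase jumps found by a hand-written binary search on the sorted list (first weight beyond w+4).
import Mathlib
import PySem

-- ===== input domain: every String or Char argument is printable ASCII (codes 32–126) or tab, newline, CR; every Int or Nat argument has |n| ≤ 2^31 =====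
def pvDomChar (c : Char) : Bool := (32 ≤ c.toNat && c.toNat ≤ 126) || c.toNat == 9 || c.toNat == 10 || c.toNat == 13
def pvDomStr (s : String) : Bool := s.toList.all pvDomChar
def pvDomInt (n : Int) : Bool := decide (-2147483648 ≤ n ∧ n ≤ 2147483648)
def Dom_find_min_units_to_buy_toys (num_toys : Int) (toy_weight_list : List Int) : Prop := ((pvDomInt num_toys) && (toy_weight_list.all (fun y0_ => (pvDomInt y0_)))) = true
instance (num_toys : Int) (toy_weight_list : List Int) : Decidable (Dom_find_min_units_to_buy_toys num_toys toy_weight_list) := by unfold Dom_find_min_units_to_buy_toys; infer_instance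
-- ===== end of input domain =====

-- B jumps from purchase to purchase with a hand-written binary search instead of A's element-by-element skip helper; objective: alternative.

-- ===== PORT A =====
-- while loop of calculate_toys_obtained_for_free; fuel (num_toys - index).toNat is enough since index grows by 1 each step
def pvCalcLoop (weight_list : List Int) (high num_toys : Int) (index : Int) (fuel : Nat) : Int :=
  match fuel with
  | 0 => index
  | fuel + 1 =>
    if index < num_toys then
      match PySem.List.pyGet? weight_list index with
      | none => index   -- IndexError: excluded by Pre_
      | some w => if w > high then index else pvCalcLoop weight_list high num_toys (index + 1) fuel
    else index

def pvCalcFree (weight_list : List Int) (index num_toys : Int) : Int :=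
  match PySem.List.pyGet? weight_list index with
  | none => index       -- IndexError: excluded by Pre_
  | some base => pvCalcLoop weight_list (base + 4) num_toys index (num_toys - index).toNat

-- outer while loop of A; fuel num_toys.toNat suffices (index grows by ≥ 1 per iteration inside Pre_)
def pvMainLoop (s : List Int) (num_toys : Int) (index units : Int) (fuel : Nat) : Int :=
  match fuel with
  | 0 => units
  | fuel + 1 =>
    if index < num_toys then
      pvMainLoop s num_toys (pvCalcFree s index num_toys) (units + 1) fuel
    else units

def find_min_units_to_buy_toys (num_toys : Int) (toy_weight_list : List Int) : Int :=
  pvMainLoop (PySem.List.sorted toy_weight_list (fun x => x)) num_toys 0 0 num_toys.toNat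

-- ===== PORT B =====
-- inner while loop of B: binary search for the first index in [lo, hi) whose weight exceeds target;
-- fuel (hi - lo).toNat is enough since the bracket shrinks each step
def pvBSearch (s : List Int) (target : Int) (lo hi : Int) (fuel : Nat) : Int :=
  match fuel with
  | 0 => lo
  | fuel + 1 =>
    if lo < hi then
      let mid := PySem.Int.floordiv (lo + hi) 2
      match PySem.List.pyGet? s mid with
      | none => lo     -- IndexError: excluded by Pre_
      | some w =>
        if w > target then pvBSearch s target lo mid fuel
        else pvBSearch s target (mid + 1) hi fuel
    else lo

-- outer while loop of B
def pvAltMain (s : List Int) (num_toys : Int) (index units : Int) (fuel : Nat) : Int :=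
  match fuel with
  | 0 => units
  | fuel + 1 =>
    if index < num_toys then
      match PySem.List.pyGet? s index with
      | none => units + 1    -- IndexError: excluded by Pre_
      | some w =>
        pvAltMain s num_toys
          (pvBSearch s (w + 4) (index + 1) num_toys (num_toys - (index + 1)).toNat)
          (units + 1) fuel
    else units

def find_min_units_to_buy_toys_alt (num_toys : Int) (toy_weight_list : List Int) : Int :=
  pvAltMain (PySem.List.sorted toy_weight_list (fun x => x)) num_toys 0 0 num_toys.toNat

-- ===== PRECONDITION & SPEC =====
-- Pre_ excludes exactly the inputs where A raises IndexError: num_toys larger than the list length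
def Pre_find_min_units_to_buy_toys (num_toys : Int) (toy_weight_list : List Int) : Prop :=
  num_toys ≤ (toy_weight_list.length : Int)
instance (num_toys : Int) (toy_weight_list : List Int) : Decidable (Pre_find_min_units_to_buy_toys num_toys toy_weight_list) := by unfold Pre_find_min_units_to_buy_toys; infer_instance

def pvWitness_find_min_units_to_buy_toys : Int × List Int := (3, [1, 2, 10])

def Spec_find_min_units_to_buy_toys (num_toys : Int) (toy_weight_list : List Int) (out : Int) : Prop := out = find_min_units_to_buy_toys_alt num_toys toy_weight_list
instance (num_toys : Int) (toy_weight_list : List Int) (out : Int) : Decidable (Spec_find_min_units_to_buy_toys num_toys toy_weight_list out) := by unfold Spec_find_min_units_to_buy_toys; infer_instance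

-- ===== CLAIM (what is proved, stated in full; the proofs are below) =====
def Claim_equal_find_min_units_to_buy_toys : Prop := ∀ (num_toys : Int) (toy_weight_list : List Int), Dom_find_min_units_to_buy_toys num_toys toy_weight_list → Pre_find_min_units_to_buy_toys num_toys toy_weight_list → Spec_find_min_units_to_buy_toys num_toys toy_weight_list (find_min_units_to_buy_toys num_toys toy_weight_list)

-- ===== LEMMAS AND PROOFS =====

-- characterisation of A's skip loop: it stops at the first index in [j, n) whose weight exceeds high (or at n)
theorem pvCalcLoop_spec (s : List Int) (h n : Int) (hn : n ≤ (s.length : Int)) :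
    ∀ (fuel : Nat) (j : Int), 0 ≤ j → j ≤ n → (n - j).toNat ≤ fuel →
      j ≤ pvCalcLoop s h n j fuel ∧ pvCalcLoop s h n j fuel ≤ n ∧
      (∀ k : Int, j ≤ k → k < pvCalcLoop s h n j fuel → s.getD k.toNat 0 ≤ h) ∧
      (pvCalcLoop s h n j fuel < n → s.getD (pvCalcLoop s h n j fuel).toNat 0 > h) := by
  intro fuel
  induction fuel with
  | zero =>
    intro j hj0 hjn hf
    have : j = n := by omega
    subst this
    simp only [pvCalcLoop]
    exact ⟨le_rfl, le_rfl, fun k hk1 hk2 => absurd hk2 (by omega), fun hh => absurd hh (by omega)⟩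
  | succ f ih =>
    intro j hj0 hjn hf
    by_cases hlt : j < n
    · have hg : PySem.List.pyGet? s j = some s[j.toNat] :=
        PySem.List.pyGet?_eq_some_getElem s hj0 (by omega)
      have hgd : s.getD j.toNat 0 = s[j.toNat] := List.getD_eq_getElem _ _ (by omega)
      unfold pvCalcLoop
      rw [if_pos hlt, hg]
      simp only
      by_cases hw : s[j.toNat] > h
      · rw [if_pos hw]
        refine ⟨le_refl j, by omega, ?_, ?_⟩
        · intro k hk1 hk2; omega
        · intro _; rw [hgd]; exact hw
      · rw [if_neg hw]
        obtain ⟨h1, h2, h3, h4⟩ := ih (j + 1) (by omega) (by omega) (by omega)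
        refine ⟨by omega, h2, ?_, h4⟩
        intro k hk1 hk2
        by_cases hkj : k = j
        · subst hkj; rw [hgd]; omega
        · exact h3 k (by omega) hk2
    · have : j = n := by omega
      subst this
      unfold pvCalcLoop
      rw [if_neg hlt]
      exact ⟨le_rfl, le_rfl, fun k hk1 hk2 => absurd hk2 (by omega), fun hh => absurd hh (by omega)⟩

-- characterisation of B's binary search: same first-index property, assuming s is sorted
theorem pvBSearch_spec (s : List Int) (t n : Int) (hn : n ≤ (s.length : Int))
    (hmono : ∀ p q : Nat, p ≤ q → q < s.length → s.getD p 0 ≤ s.getD q 0) :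
    ∀ (fuel : Nat) (lo hi : Int), 0 ≤ lo → lo ≤ hi → hi ≤ n → (hi - lo).toNat ≤ fuel →
      lo ≤ pvBSearch s t lo hi fuel ∧ pvBSearch s t lo hi fuel ≤ hi ∧
      (∀ k : Int, lo ≤ k → k < pvBSearch s t lo hi fuel → s.getD k.toNat 0 ≤ t) ∧
      (pvBSearch s t lo hi fuel < hi → s.getD (pvBSearch s t lo hi fuel).toNat 0 > t) := by
  intro fuel
  induction fuel with
  | zero =>
    intro lo hi h0 hlh hhn hf
    have : lo = hi := by omega
    subst this
    simp only [pvBSearch]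
    exact ⟨le_rfl, le_rfl, fun k hk1 hk2 => absurd hk2 (by omega), fun hh => absurd hh (by omega)⟩
  | succ f ih =>
    intro lo hi h0 hlh hhn hf
    by_cases hlt : lo < hi
    · have hmlo : lo ≤ PySem.Int.floordiv (lo + hi) 2 := by
        rw [PySem.Int.le_floordiv_iff_mul_le (by omega)]; omega
      have hmhi : PySem.Int.floordiv (lo + hi) 2 < hi := by
        rw [PySem.Int.floordiv_lt_iff_lt_mul (by omega)]; omega
      set mid := PySem.Int.floordiv (lo + hi) 2 with hmid
      have hg : PySem.List.pyGet? s mid = some s[mid.toNat] :=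
        PySem.List.pyGet?_eq_some_getElem s (by omega) (by omega)
      have hgd : s.getD mid.toNat 0 = s[mid.toNat] := List.getD_eq_getElem _ _ (by omega)
      unfold pvBSearch
      rw [if_pos hlt]
      simp only [← hmid, hg]
      by_cases hw : s[mid.toNat] > t
      · rw [if_pos hw]
        obtain ⟨h1, h2, h3, h4⟩ := ih lo mid h0 (by omega) (by omega) (by omega)
        refine ⟨h1, by omega, h3, ?_⟩
        intro hr
        by_cases hrm : pvBSearch s t lo mid f < mid
        · exact h4 hrm
        · have : pvBSearch s t lo mid f = mid := by omega
          rw [this, hgd]; exact hw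
      · rw [if_neg hw]
        obtain ⟨h1, h2, h3, h4⟩ := ih (mid + 1) hi (by omega) (by omega) hhn (by omega)
        refine ⟨by omega, h2, ?_, h4⟩
        intro k hk1 hk2
        by_cases hkm : mid + 1 ≤ k
        · exact h3 k hkm hk2
        · calc s.getD k.toNat 0 ≤ s.getD mid.toNat 0 :=
                hmono k.toNat mid.toNat (by omega) (by omega)
            _ ≤ t := by rw [hgd]; omega
    · unfold pvBSearch
      rw [if_neg hlt]
      exact ⟨le_rfl, by omega, fun k hk1 hk2 => absurd hk2 (by omega), fun hh => absurd hh (by omega)⟩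

-- the two jump computations agree
theorem pvJump_eq (s : List Int) (n : Int) (hn : n ≤ (s.length : Int))
    (hmono : ∀ p q : Nat, p ≤ q → q < s.length → s.getD p 0 ≤ s.getD q 0)
    (i : Int) (hi0 : 0 ≤ i) (hin : i < n) :
    pvCalcFree s i n = pvBSearch s (s.getD i.toNat 0 + 4) (i + 1) n (n - (i + 1)).toNat := by
  have hg : PySem.List.pyGet? s i = some s[i.toNat] :=
    PySem.List.pyGet?_eq_some_getElem s hi0 (by omega)
  have hgd : s.getD i.toNat 0 = s[i.toNat] := List.getD_eq_getElem _ _ (by omega)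
  have hfn : (n - i).toNat = (n - (i + 1)).toNat + 1 := by omega
  have hfree : pvCalcFree s i n
      = pvCalcLoop s (s[i.toNat] + 4) n (i + 1) (n - (i + 1)).toNat := by
    unfold pvCalcFree
    rw [hg]
    simp only
    rw [hfn]
    unfold pvCalcLoop
    rw [if_pos hin, hg]
    simp only
    rw [if_neg (by omega), pvCalcLoop.eq_def]
  rw [hgd, hfree]
  set t := s[i.toNat] + 4 with ht
  obtain ⟨a1, a2, a3, a4⟩ :=
    pvCalcLoop_spec s t n hn (n - (i + 1)).toNat (i + 1) (by omega) (by omega) le_rfl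
  obtain ⟨b1, b2, b3, b4⟩ :=
    pvBSearch_spec s t n hn hmono (n - (i + 1)).toNat (i + 1) n (by omega) (by omega) le_rfl le_rfl
  set rA := pvCalcLoop s t n (i + 1) (n - (i + 1)).toNat
  set rB := pvBSearch s t (i + 1) n (n - (i + 1)).toNat
  rcases lt_trichotomy rA rB with hlt | heq | hgt
  · have h1 := a4 (by omega)
    have h2 := b3 rA (by omega) hlt
    omega
  · exact heq
  · have h1 := b4 (by omega)
    have h2 := a3 rB (by omega) hgt
    omega

-- both outer loops agree once the jumps do
theorem pvMain_eq (s : List Int) (n : Int) (hn : n ≤ (s.length : Int))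
    (hmono : ∀ p q : Nat, p ≤ q → q < s.length → s.getD p 0 ≤ s.getD q 0) :
    ∀ (fuel : Nat) (i u : Int), 0 ≤ i → (n - i).toNat ≤ fuel →
      pvMainLoop s n i u fuel = pvAltMain s n i u fuel := by
  intro fuel
  induction fuel with
  | zero => intro i u _ _; rfl
  | succ f ih =>
    intro i u hi0 hf
    by_cases hlt : i < n
    · have hg : PySem.List.pyGet? s i = some s[i.toNat] :=
        PySem.List.pyGet?_eq_some_getElem s hi0 (by omega)
      have hgd : s.getD i.toNat 0 = s[i.toNat] := List.getD_eq_getElem _ _ (by omega)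
      have hjump := pvJump_eq s n hn hmono i hi0 hlt
      rw [hgd] at hjump
      unfold pvMainLoop pvAltMain
      rw [if_pos hlt, if_pos hlt, hg]
      simp only
      rw [hjump]
      obtain ⟨b1, b2, _, _⟩ :=
        pvBSearch_spec s (s[i.toNat] + 4) n hn hmono (n - (i + 1)).toNat (i + 1) n
          (by omega) (by omega) le_rfl le_rfl
      exact ih _ (u + 1) (by omega) (by omega)
    · unfold pvMainLoop pvAltMain
      rw [if_neg hlt, if_neg hlt]

-- ===== VERDICT (by name: the statement is the Claim_ definition above) =====
theorem find_min_units_to_buy_toys_spec : Claim_equal_find_min_units_to_buy_toys := by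
  intro n ws _ hpre
  unfold Spec_find_min_units_to_buy_toys find_min_units_to_buy_toys find_min_units_to_buy_toys_alt
  have hlen : (PySem.List.sorted ws (fun x => x)).length = ws.length :=
    PySem.List.length_sorted ws (fun x => x) false
  have hn : n ≤ ((PySem.List.sorted ws (fun x => x)).length : Int) := by rw [hlen]; exact hpre
  have hmono : ∀ p q : Nat, p ≤ q → q < (PySem.List.sorted ws (fun x => x)).length →
      (PySem.List.sorted ws (fun x => x)).getD p 0 ≤ (PySem.List.sorted ws (fun x => x)).getD q 0 := by
    intro p q hpq hq
    rw [List.getD_eq_getElem _ _ (by omega), List.getD_eq_getElem _ _ hq]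
    exact PySem.List.sorted_id_getElem_mono ws hpq hq
  exact pvMain_eq (PySem.List.sorted ws (fun x => x)) n hn hmono n.toNat 0 0 le_rfl (by omega)
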